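-- pv_equiv track=rewrite | github.com/jyash10/Multiple-Team-Formation | GENETIC_ALGORITHM_MINOR2.py | fitnessfunc1
-- ===== SOURCE A (Python) =====
-- from itertools import islice
-- import copy
--
-- def fitnessfunc1(chromosome, sociomat, projects_size):  # for sociometric matrix
--     mylist = copy.deepcopy(chromosome)
--     seclist = [projects_size[i] for i in range(0,len(projects_size))]
--     it = iter(mylist)
--     teams = [list(islice(it, 0, i)) for i in seclist]
--     sum = 0
--     for k in range(0, len(teams)):
--         list1 = teams[k]
--         for i in range(0, len(teams[k])):
--             # for each team we have to calculate score
--             for j in range(0, len(teams[k])):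
--                 if(i != j):
--                     sum += sociomat[list1[j]-1][list1[i]-1]
--     return sum
-- ===== SOURCE B (Python) =====
-- def fitnessfunc1(chromosome, sociomat, projects_size):
--     # Multiplicity-based: count occurrences per team, then sum over DISTINCT
--     # value pairs weighted by counts (c_u*(c_u-1) ordered pairs for u==v,
--     # c_u*c_v for u!=v) -- no per-occurrence pair enumeration, no i!=j guard.
--     total = 0
--     start = 0
--     for size in projects_size:
--         counts = {}
--         for x in chromosome[start:start + size]:
--             counts[x] = counts.get(x, 0) + 1
--         start += size
--         for u, cu in counts.items():
--             for v, cv in counts.items():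
--                 mult = cu * (cu - 1) if u == v else cu * cv
--                 total += mult * sociomat[v - 1][u - 1]
--     return total
-- ===== Notes on version B (the rewrite author's own statement) =====
-- stated objective: alternative
-- what changed: B builds a per-team occurrence counter (dict) over a prefix-offset slice and sums sociomat entries over DISTINCT value pairs weighted by multiplicities (c_u*(c_u-1) for u==v, c_u*c_v for u!=v), replacing A's islice partition and per-occurrence triple index loop with its i != j guard; this is O(d^2) per team in the number d of distinct members instead of O(n^2) in team size.
-- outside the precondition, e.g. on fitnessfunc1([5], [[1]], [1]): A returns 0, B raises IndexError; on fitnessfunc1([1, 1], [[2], []], [2]): A returns 4, B returns 4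
import Mathlib
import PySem

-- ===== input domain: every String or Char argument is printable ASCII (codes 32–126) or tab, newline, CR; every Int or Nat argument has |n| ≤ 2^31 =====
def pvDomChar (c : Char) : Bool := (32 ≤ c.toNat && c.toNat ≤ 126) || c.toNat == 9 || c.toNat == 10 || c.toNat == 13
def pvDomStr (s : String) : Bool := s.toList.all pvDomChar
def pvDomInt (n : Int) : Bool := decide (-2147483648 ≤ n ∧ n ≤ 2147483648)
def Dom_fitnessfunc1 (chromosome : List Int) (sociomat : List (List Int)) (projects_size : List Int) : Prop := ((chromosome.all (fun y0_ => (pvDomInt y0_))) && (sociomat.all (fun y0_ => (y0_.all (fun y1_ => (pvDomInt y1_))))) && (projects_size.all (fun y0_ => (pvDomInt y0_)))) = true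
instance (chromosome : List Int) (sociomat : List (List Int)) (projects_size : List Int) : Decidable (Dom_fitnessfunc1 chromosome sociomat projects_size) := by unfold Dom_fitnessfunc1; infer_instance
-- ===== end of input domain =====

-- B replaces A's islice partition and per-occurrence triple loop (guard i != j) by a per-team
-- occurrence COUNTER over a prefix-offset slice: the score is summed over DISTINCT member pairs
-- weighted by multiplicities (c_u*(c_u-1) ordered pairs for u = v, c_u*c_v otherwise).
-- Objective: alternative (O(d^2) per team in distinct members d); return value only — neither
-- program mutates its arguments.

-- ===== PORT A =====
-- teams = [list(islice(it, 0, i)) for i in seclist]: each comprehension step consumes min(i, remaining)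
-- elements of the shared iterator.  For i < 0 Python islice raises ValueError (excluded by Pre_);
-- Int.toNat clamps to 0 there.
def pvTeamsA : List Int → List Int → List (List Int)
  | _, [] => []
  | rest, s :: ss => rest.take s.toNat :: pvTeamsA (rest.drop s.toNat) ss

def fitnessfunc1 (chromosome : List Int) (sociomat : List (List Int)) (projects_size : List Int) : Int :=
  let mylist := chromosome   -- copy.deepcopy of a list of ints: same values
  let seclist := (PySem.List.pyRange 0 (PySem.List.len projects_size) 1).map
    (fun i => PySem.List.pyGetD projects_size i 0)
  let teams := pvTeamsA mylist seclist
  (PySem.List.pyRange 0 (PySem.List.len teams) 1).foldl (fun sum k =>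
    let list1 := PySem.List.pyGetD teams k []
    (PySem.List.pyRange 0 (PySem.List.len list1) 1).foldl (fun sum i =>
      (PySem.List.pyRange 0 (PySem.List.len list1) 1).foldl (fun sum j =>
        if i ≠ j then
          sum + PySem.List.pyGetD (PySem.List.pyGetD sociomat (PySem.List.pyGetD list1 j 0 - 1) [])
                  (PySem.List.pyGetD list1 i 0 - 1) 0
        else sum) sum) sum) 0

-- ===== PORT B =====
def fitnessfunc1_alt (chromosome : List Int) (sociomat : List (List Int)) (projects_size : List Int) : Int :=
  (projects_size.foldl (fun (acc : Int × Int) size =>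
      let total := acc.1
      let start := acc.2
      let counts := (PySem.List.slice chromosome (some start) (some (start + size))).foldl
        (fun d x => PySem.Dict.insert d x (PySem.Dict.getD d x 0 + 1)) PySem.Dict.empty
      let start := start + size
      let total := counts.items.foldl (fun total (p : Int × Int) =>
          let u := p.1
          let cu := p.2
          counts.items.foldl (fun total (q : Int × Int) =>
            let v := q.1
            let cv := q.2
            let mult := if u = v then cu * (cu - 1) else cu * cv
            total + mult * PySem.List.pyGetD (PySem.List.pyGetD sociomat (v - 1) []) (u - 1) 0)
            total) total
      (total, start)) ((0 : Int), (0 : Int))).1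

-- ===== PRECONDITION & SPEC =====
-- Pre_ excludes inputs where Python A raises: a negative project size (islice → ValueError) and a
-- consumed chromosome entry that is not a valid Python index (after the -1 shift, with negative-index
-- wraparound) into sociomat and into every one of its rows (→ IndexError).  Requiring validity against
-- EVERY row, for EVERY consumed entry, slightly over-approximates the entries A actually reads (members
-- of singleton teams, rows never accessed), so a few inputs on which A still returns are excluded — see
-- the cites in claim.json.
def Pre_fitnessfunc1 (chromosome : List Int) (sociomat : List (List Int)) (projects_size : List Int) : Prop :=
  (∀ s ∈ projects_size, (0 : Int) ≤ s) ∧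
  ∀ x ∈ chromosome.take projects_size.sum.toNat,
    (-(sociomat.length : Int) ≤ x - 1 ∧ x - 1 < (sociomat.length : Int)) ∧
    ∀ r ∈ sociomat, -(r.length : Int) ≤ x - 1 ∧ x - 1 < (r.length : Int)
instance (chromosome : List Int) (sociomat : List (List Int)) (projects_size : List Int) : Decidable (Pre_fitnessfunc1 chromosome sociomat projects_size) := by unfold Pre_fitnessfunc1; infer_instance

def pvWitness_fitnessfunc1 : List Int × List (List Int) × List Int := ([1, 2], [[0, 1], [1, 0]], [2])

def Spec_fitnessfunc1 (chromosome : List Int) (sociomat : List (List Int)) (projects_size : List Int) (out : Int) : Prop := out = fitnessfunc1_alt chromosome sociomat projects_size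
instance (chromosome : List Int) (sociomat : List (List Int)) (projects_size : List Int) (out : Int) : Decidable (Spec_fitnessfunc1 chromosome sociomat projects_size out) := by unfold Spec_fitnessfunc1; infer_instance

-- ===== CLAIM (what is proved, stated in full; the proofs are below) =====
def Claim_equal_fitnessfunc1 : Prop := ∀ (chromosome : List Int) (sociomat : List (List Int)) (projects_size : List Int), Dom_fitnessfunc1 chromosome sociomat projects_size → Pre_fitnessfunc1 chromosome sociomat projects_size → Spec_fitnessfunc1 chromosome sociomat projects_size (fitnessfunc1 chromosome sociomat projects_size)

-- ===== LEMMAS AND PROOFS =====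

-- the single matrix access both programs perform
def pvF (sociomat : List (List Int)) (u v : Int) : Int :=
  PySem.List.pyGetD (PySem.List.pyGetD sociomat (u - 1) []) (v - 1) 0

-- common value of one team's score: all ordered pairs minus the diagonal
def pvScore (sociomat : List (List Int)) (l : List Int) : Int :=
  (∑ i ∈ Finset.range l.length, ∑ j ∈ Finset.range l.length, pvF sociomat (l.getD i 0) (l.getD j 0))
    - ∑ i ∈ Finset.range l.length, pvF sociomat (l.getD i 0) (l.getD i 0)

lemma pvSumRange (n : Nat) (h : Nat → Int) :
    ((List.range n).map h).sum = ∑ i ∈ Finset.range n, h i := rfl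

lemma pvSumMap (l : List Int) (g : Int → Int) :
    (l.map g).sum = ∑ i ∈ Finset.range l.length, g (l.getD i 0) := by
  induction l with
  | nil => simp
  | cons a t ih =>
      simp only [List.map_cons, List.sum_cons, List.length_cons, Finset.sum_range_succ',
        List.getD_cons_succ, List.getD_cons_zero, ih]
      ring

lemma pvDiagSum (n : Nat) (a : Nat → Int) (i : Nat) (hi : i ∈ Finset.range n) :
    ∑ j ∈ Finset.range n, (if i = j then 0 else a j) = (∑ j ∈ Finset.range n, a j) - a i := by
  have h : ∀ j, (if i = j then (0 : Int) else a j) = a j - (if i = j then a j else 0) := by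
    intro j; split <;> simp
  simp only [h, Finset.sum_sub_distrib, Finset.sum_ite_eq, hi, if_pos]

-- A's double loop over one team, started from any accumulator
lemma pvTeamA (sociomat : List (List Int)) (l : List Int) (s : Int) :
    (PySem.List.pyRange 0 (PySem.List.len l) 1).foldl (fun sum i =>
      (PySem.List.pyRange 0 (PySem.List.len l) 1).foldl (fun sum j =>
        if i ≠ j then
          sum + PySem.List.pyGetD (PySem.List.pyGetD sociomat (PySem.List.pyGetD l j 0 - 1) [])
                  (PySem.List.pyGetD l i 0 - 1) 0
        else sum) sum) s
    = s + pvScore sociomat l := by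
  have hg : ∀ i : Int, (fun (sum j : Int) =>
      if i ≠ j then
        sum + PySem.List.pyGetD (PySem.List.pyGetD sociomat (PySem.List.pyGetD l j 0 - 1) [])
                (PySem.List.pyGetD l i 0 - 1) 0
      else sum)
      = fun sum j => sum + (if i ≠ j then pvF sociomat (PySem.List.pyGetD l j 0) (PySem.List.pyGetD l i 0) else 0) := by
    intro i; funext sum j; by_cases h : i = j <;> simp [h, pvF]
  simp only [hg, PySem.List.foldl_add, PySem.List.len, PySem.List.pyRange_zero_nat,
    List.map_map, pvSumRange, Function.comp_def, PySem.List.pyGetD_natCast]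
  have hite : ∀ i j : Nat,
      (if (i : Int) ≠ (j : Int) then pvF sociomat (l.getD j 0) (l.getD i 0) else 0)
        = (if i = j then 0 else pvF sociomat (l.getD j 0) (l.getD i 0)) := by
    intro i j; by_cases h : i = j <;> simp [h]
  simp only [hite]
  rw [Finset.sum_congr rfl (fun i hi =>
    pvDiagSum l.length (fun j => pvF sociomat (l.getD j 0) (l.getD i 0)) i hi)]
  simp only [Finset.sum_sub_distrib, pvScore]
  rw [Finset.sum_comm]

-- A's value is the sum of pvScore over the islice partition
lemma pvAtotal (chromosome : List Int) (sociomat : List (List Int)) (projects_size : List Int) :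
    fitnessfunc1 chromosome sociomat projects_size
      = ((pvTeamsA chromosome projects_size).map (pvScore sociomat)).sum := by
  unfold fitnessfunc1
  dsimp only
  rw [show (PySem.List.pyRange 0 (PySem.List.len projects_size) 1).map
        (fun i => PySem.List.pyGetD projects_size i 0) = projects_size from
      PySem.List.map_pyGetD_pyRange_zero projects_size 0]
  have h : (fun (sum k : Int) =>
      let list1 := PySem.List.pyGetD (pvTeamsA chromosome projects_size) k []
      (PySem.List.pyRange 0 (PySem.List.len list1) 1).foldl (fun sum i =>
        (PySem.List.pyRange 0 (PySem.List.len list1) 1).foldl (fun sum j =>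
          if i ≠ j then
            sum + PySem.List.pyGetD (PySem.List.pyGetD sociomat (PySem.List.pyGetD list1 j 0 - 1) [])
                    (PySem.List.pyGetD list1 i 0 - 1) 0
          else sum) sum) sum)
      = fun sum k => sum + pvScore sociomat (PySem.List.pyGetD (pvTeamsA chromosome projects_size) k []) := by
    funext sum k
    exact pvTeamA sociomat (PySem.List.pyGetD (pvTeamsA chromosome projects_size) k []) sum
  rw [h, PySem.List.foldl_add]
  rw [show (fun k => pvScore sociomat (PySem.List.pyGetD (pvTeamsA chromosome projects_size) k []))
        = pvScore sociomat ∘ (fun k => PySem.List.pyGetD (pvTeamsA chromosome projects_size) k []) from rfl]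
  rw [← List.map_map, PySem.List.map_pyGetD_pyRange_zero]
  simp

-- on a Nodup key list containing a, the if-pick sum selects g a
lemma pvPick (keys : List Int) (a : Int) (g : Int → Int)
    (hnd : keys.Nodup) (ha : a ∈ keys) :
    (keys.map (fun v => if v = a then g v else 0)).sum = g a := by
  induction keys with
  | nil => cases ha
  | cons k t ih =>
      rcases List.nodup_cons.mp hnd with ⟨hk, ht⟩
      by_cases h : k = a
      · subst h
        have : (t.map (fun v => if v = k then g v else 0)).sum = 0 := by
          apply List.sum_eq_zero
          intro x hx
          rcases List.mem_map.mp hx with ⟨v, hv, rfl⟩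
          have : v ≠ k := fun hvk => hk (hvk ▸ hv)
          simp [this]
        simp [this]
      · have ha' : a ∈ t := by
          rcases List.mem_cons.mp ha with h' | h'
          · exact absurd h'.symm h
          · exact h'
        simp [h, ih ht ha']

-- summing count * g over a Nodup key list covering l is summing g over l
lemma pvCountSum (l keys : List Int) (g : Int → Int)
    (hnd : keys.Nodup) (hsub : ∀ x ∈ l, x ∈ keys) :
    (keys.map (fun u => (l.count u : Int) * g u)).sum = (l.map g).sum := by
  induction l with
  | nil => simp
  | cons a t ih =>
      have hsub' : ∀ x ∈ t, x ∈ keys := fun x hx => hsub x (List.mem_cons_of_mem a hx)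
      have hcnt : ∀ u : Int, ((a :: t).count u : Int) * g u
          = (t.count u : Int) * g u + (if u = a then g u else 0) := by
        intro u
        by_cases h : u = a
        · subst h; simp [List.count_cons_self]; ring
        · simp [h]
          left
          exact List.count_cons_of_ne (fun e => h e.symm)
      simp only [hcnt]
      rw [PySem.List.sum_map_add_int (f := fun u => (t.count u : Int) * g u)
        (g := fun u => if u = a then g u else 0)]
      rw [ih hsub', pvPick keys a g hnd (hsub a (List.mem_cons_self))]
      simp [add_comm]

-- B's per-team sum over distinct keys with multiplicities equals the ordered-pair score
lemma pvKeySum (sociomat : List (List Int)) (team keys : List Int)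
    (hnd : keys.Nodup) (hsub : ∀ x ∈ team, x ∈ keys) :
    (keys.map (fun u => (keys.map (fun v =>
        (if u = v then (team.count u : Int) * ((team.count u : Int) - 1)
         else (team.count u : Int) * (team.count v : Int)) * pvF sociomat v u)).sum)).sum
    = pvScore sociomat team := by
  have hinner : ∀ u ∈ keys,
      (keys.map (fun v =>
        (if u = v then (team.count u : Int) * ((team.count u : Int) - 1)
         else (team.count u : Int) * (team.count v : Int)) * pvF sociomat v u)).sum
      = (team.count u : Int) * ((team.map (fun y => pvF sociomat y u)).sum - pvF sociomat u u) := by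
    intro u hu
    have hpt : ∀ v,
        (if u = v then (team.count u : Int) * ((team.count u : Int) - 1)
         else (team.count u : Int) * (team.count v : Int)) * pvF sociomat v u
        = (team.count u : Int) * ((team.count v : Int) * pvF sociomat v u)
          + (if v = u then -((team.count u : Int) * pvF sociomat v u) else 0) := by
      intro v
      by_cases h : u = v
      · subst h; simp; ring
      · rw [if_neg h, if_neg (fun e : v = u => h (Eq.symm e))]
        ring
    simp only [hpt]
    rw [PySem.List.sum_map_add_int, List.sum_map_mul_left keys
      (fun v => (team.count v : Int) * pvF sociomat v u) ((team.count u : Int)),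
      pvCountSum team keys (fun v => pvF sociomat v u) hnd hsub,
      pvPick keys u (fun v => -((team.count u : Int) * pvF sociomat v u)) hnd hu]
    ring
  rw [List.map_congr_left hinner,
    pvCountSum team keys
      (fun u => (team.map (fun y => pvF sociomat y u)).sum - pvF sociomat u u) hnd hsub]
  have hpt2 : ∀ x, ((team.map (fun y => pvF sociomat y x)).sum - pvF sociomat x x)
      = (∑ j ∈ Finset.range team.length, pvF sociomat (team.getD j 0) x) - pvF sociomat x x := by
    intro x; rw [pvSumMap]
  simp only [hpt2]
  rw [pvSumMap team (fun x => (∑ j ∈ Finset.range team.length, pvF sociomat (team.getD j 0) x) - pvF sociomat x x)]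
  simp only [Finset.sum_sub_distrib, pvScore]
  rw [Finset.sum_comm]

-- B's counter double loop over one team, started from any accumulator
lemma pvTeamB (sociomat : List (List Int)) (team : List Int) (t : Int) :
    (let counts := team.foldl (fun d x => PySem.Dict.insert d x (PySem.Dict.getD d x 0 + 1)) PySem.Dict.empty
     counts.items.foldl (fun total (p : Int × Int) =>
        counts.items.foldl (fun total (q : Int × Int) =>
          total + (if p.1 = q.1 then p.2 * (p.2 - 1) else p.2 * q.2)
            * PySem.List.pyGetD (PySem.List.pyGetD sociomat (q.1 - 1) []) (p.1 - 1) 0)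
          total) t)
    = t + pvScore sociomat team := by
  simp only [PySem.Dict.foldl_insert_getD_add_one_eq_counter, PySem.Dict.items_counter]
  simp only [PySem.List.foldl_add]
  simp only [List.map_map, Function.comp_def]
  simp only [show ∀ (v u : Int), PySem.List.pyGetD (PySem.List.pyGetD sociomat (v - 1) []) (u - 1) 0
    = pvF sociomat v u from fun v u => rfl]
  rw [pvKeySum sociomat team (PySem.Set.ofList team)
    (PySem.Set.nodup_ofList team) (fun x hx => (PySem.Set.mem_ofList team x).mpr hx)]

-- B's fold, from any accumulator and any nonnegative offset, adds the same per-team scores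
lemma pvBfold (sociomat : List (List Int)) (chromosome : List Int) (projects_size : List Int)
    (t off : Int) (h0 : 0 ≤ off) (hs : ∀ s ∈ projects_size, (0 : Int) ≤ s) :
    (projects_size.foldl (fun (acc : Int × Int) size =>
        let total := acc.1
        let start := acc.2
        let counts := (PySem.List.slice chromosome (some start) (some (start + size))).foldl
          (fun d x => PySem.Dict.insert d x (PySem.Dict.getD d x 0 + 1)) PySem.Dict.empty
        let start := start + size
        let total := counts.items.foldl (fun total (p : Int × Int) =>
            counts.items.foldl (fun total (q : Int × Int) =>
              total + (if p.1 = q.1 then p.2 * (p.2 - 1) else p.2 * q.2)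
                * PySem.List.pyGetD (PySem.List.pyGetD sociomat (q.1 - 1) []) (p.1 - 1) 0)
              total) total
        (total, start)) (t, off)).1
    = t + ((pvTeamsA (chromosome.drop off.toNat) projects_size).map (pvScore sociomat)).sum := by
  induction projects_size generalizing t off with
  | nil => simp [pvTeamsA]
  | cons s ss ih =>
      have hs0 : (0 : Int) ≤ s := hs s (by simp)
      have hss : ∀ x ∈ ss, (0 : Int) ≤ x := fun x hx => hs x (by simp [hx])
      have hteam : PySem.List.slice chromosome (some off) (some (off + s))
          = (chromosome.drop off.toNat).take s.toNat := by
        rw [PySem.List.slice_toNat chromosome h0 (by omega)]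
        congr 1
        omega
      simp only [List.foldl_cons]
      rw [ih _ (off + s) (by omega) hss]
      have hdrop : chromosome.drop (off + s).toNat = (chromosome.drop off.toNat).drop s.toNat := by
        rw [List.drop_drop]
        congr 1
        omega
      rw [hdrop, hteam]
      simp only [pvTeamsA, List.map_cons, List.sum_cons]
      rw [pvTeamB sociomat ((chromosome.drop off.toNat).take s.toNat)]
      ring

-- ===== VERDICT (by name: the statement is the Claim_ definition above) =====
theorem fitnessfunc1_spec : Claim_equal_fitnessfunc1 := by
  intro chromosome sociomat projects_size _ hpre
  unfold Spec_fitnessfunc1 fitnessfunc1_alt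
  rw [pvBfold sociomat chromosome projects_size 0 0 le_rfl hpre.1]
  rw [pvAtotal]
  simp
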